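-- pv_equiv track=rewrite | github.com/jgabrielsg/Calf-Behavior-Classification | holsteinlib/shake_pattern_detector.py | trim_zeros
-- ===== SOURCE A (Python) =====
-- def trim_zeros(arr):
--     """
--     Trims leading and trailing zeros from the array.
--
--     Parameters:
--     arr (list): The input array.
--
--     Returns:
--     list: The array with leading and trailing zeros removed.
--     """
--     start = 0
--     end = len(arr)
--
--     # Find the first non-zero element
--     while start < end and arr[start] == 0:
--         start += 1
--
--     # Find the last non-zero element
--     while end > start and arr[end-1] == 0:
--         end -= 1
--
--     return arr[start:end]
-- ===== SOURCE B (Python) =====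
-- def trim_zeros(arr):
--     nonzero = [i for i, x in enumerate(arr) if x != 0]
--     if not nonzero:
--         return arr[0:0]
--     return arr[nonzero[0]:nonzero[-1] + 1]
-- ===== Notes on version B (the rewrite author's own statement) =====
-- stated objective: alternative
-- what changed: Replaces A's two early-stopping index pointer scans with one full pass that builds the list of nonzero indices and slices between its first and last entry.
import Mathlib
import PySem

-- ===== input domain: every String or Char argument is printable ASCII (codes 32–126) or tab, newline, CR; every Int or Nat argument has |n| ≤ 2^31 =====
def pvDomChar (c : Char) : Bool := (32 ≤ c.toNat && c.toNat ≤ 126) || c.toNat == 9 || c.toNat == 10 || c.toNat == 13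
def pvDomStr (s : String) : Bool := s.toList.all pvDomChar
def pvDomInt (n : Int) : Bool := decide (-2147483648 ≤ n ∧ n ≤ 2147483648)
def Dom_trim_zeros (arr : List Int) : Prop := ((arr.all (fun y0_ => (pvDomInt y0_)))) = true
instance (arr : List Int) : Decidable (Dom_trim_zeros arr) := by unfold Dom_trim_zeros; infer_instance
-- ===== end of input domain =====

-- B replaces A's two early-stopping pointer scans by one full pass collecting the
-- nonzero indices and slicing between the first and the last one; same O(n) cost.

-- ===== PORT A =====
-- while start < end and arr[start] == 0: start += 1
def pvFindStart (arr : List Int) (start e : Int) : Int :=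
  if h : start < e ∧ PySem.List.pyGetD arr start 0 == 0 then
    pvFindStart arr (start + 1) e
  else start
termination_by (e - start).toNat
decreasing_by omega

-- while end > start and arr[end-1] == 0: end -= 1
def pvFindEnd (arr : List Int) (start e : Int) : Int :=
  if h : e > start ∧ PySem.List.pyGetD arr (e - 1) 0 == 0 then
    pvFindEnd arr start (e - 1)
  else e
termination_by (e - start).toNat
decreasing_by omega

def trim_zeros (arr : List Int) : List Int :=
  let start := pvFindStart arr 0 arr.length
  let e := pvFindEnd arr start arr.length
  PySem.List.slice arr (some start) (some e)

-- ===== PORT B =====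
-- [i for i, x in enumerate(arr) if x != 0]
def pvNonzeroIdx (arr : List Int) (s : Int) : List Int :=
  ((PySem.List.enumerate arr s).filter (fun q => q.2 != 0)).map Prod.fst

def trim_zeros_alt (arr : List Int) : List Int :=
  let nonzero := pvNonzeroIdx arr 0
  if nonzero.isEmpty then PySem.List.slice arr (some 0) (some 0)
  else PySem.List.slice arr (some (PySem.List.pyGetD nonzero 0 0))
         (some (PySem.List.pyGetD nonzero (-1) 0 + 1))

-- ===== PRECONDITION & SPEC =====
def Spec_trim_zeros (arr : List Int) (out : List Int) : Prop := out = trim_zeros_alt arr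
instance (arr : List Int) (out : List Int) : Decidable (Spec_trim_zeros arr out) := by unfold Spec_trim_zeros; infer_instance

-- ===== CLAIM (what is proved, stated in full; the proofs are below) =====
def Claim_equal_trim_zeros : Prop := ∀ (arr : List Int), Dom_trim_zeros arr → Spec_trim_zeros arr (trim_zeros arr)

-- ===== LEMMAS AND PROOFS =====

-- A's first loop counts the leading zeros.
lemma pvFindStart_spec (suf pre : List Int) :
    pvFindStart (pre ++ suf) pre.length (pre.length + suf.length) =
      pre.length + (suf.takeWhile (fun x => x == 0)).length := by
  induction suf generalizing pre with
  | nil => rw [pvFindStart]; simp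
  | cons x rest ih =>
      rw [pvFindStart]
      have hget : PySem.List.pyGetD (pre ++ x :: rest) (pre.length : Int) 0 = x := by
        rw [PySem.List.pyGetD_natCast]
        simp [List.getD_eq_getElem?_getD]
      by_cases hx : x = 0
      · rw [dif_pos ⟨by simp only [List.length_cons]; push_cast; omega, by rw [hget]; simp [hx]⟩]
        have h2 : pre ++ x :: rest = (pre ++ [x]) ++ rest := by simp
        have h3 : (pre.length : Int) + 1 = ((pre ++ [x]).length : Int) := by simp
        have h4 : (pre.length : Int) + ((x :: rest).length : Int) =
            ((pre ++ [x]).length : Int) + (rest.length : Int) := by simp; ring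
        rw [h2, h3, h4, ih (pre ++ [x])]
        simp [hx]
        ring
      · rw [dif_neg (by simp [hget, hx])]
        simp [hx]

-- pvFindEnd never reads at or past e, so a suffix beyond e is irrelevant.
lemma pvFindEnd_irrel (n : Nat) (xs zs : List Int) (s e : Int) (hn : (e - s).toNat ≤ n)
    (h0 : 0 ≤ s) (he : e ≤ (xs.length : Int)) :
    pvFindEnd (xs ++ zs) s e = pvFindEnd xs s e := by
  induction n generalizing e with
  | zero =>
      rw [pvFindEnd]; conv_rhs => rw [pvFindEnd]
      rw [dif_neg (by rintro ⟨h, -⟩; omega), dif_neg (by rintro ⟨h, -⟩; omega)]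
  | succ n ih =>
      by_cases hse : s < e
      · have hget : PySem.List.pyGetD (xs ++ zs) (e - 1) 0 = PySem.List.pyGetD xs (e - 1) 0 := by
          rw [PySem.List.pyGetD_eq_getElem _ 0 (by omega) (by simp; omega),
              PySem.List.pyGetD_eq_getElem _ 0 (by omega) (by omega)]
          exact List.getElem_append_left (by omega)
        rw [pvFindEnd]; conv_rhs => rw [pvFindEnd]
        rw [hget]
        by_cases hz : PySem.List.pyGetD xs (e - 1) 0 = 0
        · rw [dif_pos ⟨hse, by simp [hz]⟩, dif_pos ⟨hse, by simp [hz]⟩]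
          exact ih (e - 1) (by omega) (by omega)
        · rw [dif_neg (by simp [hz]), dif_neg (by simp [hz])]
      · rw [pvFindEnd]; conv_rhs => rw [pvFindEnd]
        rw [dif_neg (by rintro ⟨h, -⟩; omega), dif_neg (by rintro ⟨h, -⟩; omega)]

-- A's second loop strips an all-zero suffix …
lemma pvFindEnd_zeros (zs ys : List Int) (s : Int) (hz : ∀ z ∈ zs, z = 0)
    (h0 : 0 ≤ s) (hs : s ≤ (ys.length : Int)) :
    pvFindEnd (ys ++ zs) s ((ys.length : Int) + zs.length) = pvFindEnd ys s ys.length := by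
  induction zs using List.reverseRecOn with
  | nil => simp
  | append_singleton zs' z ih =>
      have hz' : z = 0 := hz z (by simp)
      have hzs' : ∀ w ∈ zs', w = 0 := fun w hw => hz w (by simp [hw])
      have hget : PySem.List.pyGetD (ys ++ (zs' ++ [z])) ((ys.length : Int) + (zs' ++ [z]).length - 1) 0 = z := by
        have : (ys.length : Int) + (zs' ++ [z]).length - 1 = ((ys ++ zs').length : Int) := by
          simp; ring
        rw [this, PySem.List.pyGetD_natCast]
        rw [show ys ++ (zs' ++ [z]) = (ys ++ zs') ++ [z] by simp]
        simp [List.getD_eq_getElem?_getD]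
      rw [pvFindEnd, dif_pos ⟨by simp; omega, by rw [hget]; simp [hz']⟩]
      have h1 : (ys.length : Int) + ((zs' ++ [z]).length : Int) - 1 = (ys.length : Int) + (zs'.length : Int) := by
        simp; ring
      rw [h1, show ys ++ (zs' ++ [z]) = (ys ++ zs') ++ [z] by simp]
      rw [pvFindEnd_irrel ((ys.length : Int) + zs'.length - s).toNat (ys ++ zs') [z] s _ (le_refl _) h0 (by simp)]
      exact ih hzs'

-- … and stops at a nonzero last element.
lemma pvFindEnd_stop (ys : List Int) (s : Int) (h : ys ≠ []) (hlast : ys.getLast h ≠ 0)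
    (hs : s ≤ (ys.length : Int)) :
    pvFindEnd ys s ys.length = ys.length := by
  rw [pvFindEnd]
  by_cases hse : s < (ys.length : Int)
  · have hlen : 0 < ys.length := List.length_pos_iff.2 h
    have hget : PySem.List.pyGetD ys ((ys.length : Int) - 1) 0 = ys.getLast h := by
      rw [PySem.List.pyGetD_eq_getElem _ 0 (by omega) (by omega)]
      rw [List.getLast_eq_getElem]
      congr 1; omega
    rw [dif_neg (by simp [hget, hlast])]
  · rw [dif_neg (by rintro ⟨h', -⟩; omega)]

lemma pvEnumerate_append (xs ys : List Int) (s : Int) :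
    PySem.List.enumerate (xs ++ ys) s =
      PySem.List.enumerate xs s ++ PySem.List.enumerate ys (s + xs.length) := by
  induction xs generalizing s with
  | nil => simp [PySem.List.enumerate]
  | cons x xs ih =>
      simp [PySem.List.enumerate_cons, ih, List.length_cons]
      rw [show s + 1 + (xs.length : Int) = s + ((xs.length : Int) + 1) by ring]

lemma pvNonzeroIdx_cons (x : Int) (xs : List Int) (s : Int) :
    pvNonzeroIdx (x :: xs) s =
      if x = 0 then pvNonzeroIdx xs (s+1) else s :: pvNonzeroIdx xs (s+1) := by
  by_cases hx : x = 0 <;> simp [pvNonzeroIdx, PySem.List.enumerate_cons, hx]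

lemma pvNonzeroIdx_nil_iff (arr : List Int) (s : Int) :
    pvNonzeroIdx arr s = [] ↔ ∀ x ∈ arr, x = 0 := by
  induction arr generalizing s with
  | nil => simp [pvNonzeroIdx, PySem.List.enumerate]
  | cons x xs ih =>
      by_cases hx : x = 0
      · simp [pvNonzeroIdx_cons, hx, ih]
      · simp [pvNonzeroIdx_cons, hx]

-- B's first nonzero index sits right after the leading zeros.
lemma pvNonzeroIdx_head (arr : List Int) (s : Int) (h : ¬ ∀ x ∈ arr, x = 0) :
    (pvNonzeroIdx arr s).head? = some (s + (arr.takeWhile (fun x => x == 0)).length) := by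
  induction arr generalizing s with
  | nil => simp at h
  | cons x xs ih =>
      by_cases hx : x = 0
      · have h' : ¬ ∀ y ∈ xs, y = 0 := by simpa [hx] using h
        rw [pvNonzeroIdx_cons, if_pos hx, ih (s+1) h']
        simp [hx]
        ring
      · rw [pvNonzeroIdx_cons, if_neg hx]
        simp [hx]

-- B's last nonzero index sits right before the trailing zeros.
lemma pvNonzeroIdx_last (arr : List Int) (s : Int) (h : ¬ ∀ x ∈ arr, x = 0) :
    (pvNonzeroIdx arr s).getLast? =
      some (s + arr.length - 1 - (arr.reverse.takeWhile (fun x => x == 0)).length) := by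
  induction arr using List.reverseRecOn generalizing s with
  | nil => simp at h
  | append_singleton xs x ih =>
      by_cases hx : x = 0
      · have h' : ¬ ∀ y ∈ xs, y = 0 := by
          intro hall; exact h (by intro y hy; rcases List.mem_append.1 hy with h1 | h1
                                  · exact hall y h1
                                  · simp at h1; omega)
        have := ih s h'
        simp only [pvNonzeroIdx, pvEnumerate_append] at this ⊢
        simp [PySem.List.enumerate, hx, this, List.reverse_append]
        ring_nf
      · simp only [pvNonzeroIdx, pvEnumerate_append]
        simp [PySem.List.enumerate, hx, List.reverse_append]
        ring_nf

-- Main assembly.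
theorem trim_zeros_spec_aux (arr : List Int) : trim_zeros arr = trim_zeros_alt arr := by
  unfold trim_zeros trim_zeros_alt
  by_cases hall : ∀ x ∈ arr, x = 0
  · -- all zeros (or empty): both sides are the empty slice
    have hnz : pvNonzeroIdx arr 0 = [] := (pvNonzeroIdx_nil_iff arr 0).2 hall
    have htw : arr.takeWhile (fun x => x == 0) = arr :=
      List.takeWhile_eq_self_iff.2 (fun x hx => by simp [hall x hx])
    have hstart : pvFindStart arr 0 (arr.length : Int) = (arr.length : Int) := by
      have := pvFindStart_spec arr []
      simpa [htw] using this
    have hend : pvFindEnd arr (arr.length : Int) (arr.length : Int) = (arr.length : Int) := by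
      rw [pvFindEnd, dif_neg (by rintro ⟨h', -⟩; omega)]
    simp only [hnz, List.isEmpty_nil, if_true, hstart, hend]
    rw [PySem.List.slice_natCast]
    rw [show (0 : Int) = ((0 : Nat) : Int) by simp, PySem.List.slice_natCast]
    simp
  · -- at least one nonzero element
    have hne : pvNonzeroIdx arr 0 ≠ [] := fun hn => hall ((pvNonzeroIdx_nil_iff arr 0).1 hn)
    have hrevne : arr.reverse.dropWhile (fun x => x == 0) ≠ [] := by
      intro hd
      exact hall (fun x hx => by
        have := List.dropWhile_eq_nil_iff.1 hd x (List.mem_reverse.2 hx)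
        simpa using this)
    -- decompose arr into ys ++ zs, zs the maximal all-zero suffix
    have harr : arr = (arr.reverse.dropWhile (fun x => x == 0)).reverse ++
        (arr.reverse.takeWhile (fun x => x == 0)).reverse := by
      conv_lhs => rw [← arr.reverse_reverse]
      conv_lhs => rw [← List.takeWhile_append_dropWhile (p := fun x => x == 0) (l := arr.reverse)]
      rw [List.reverse_append]
    set ys := (arr.reverse.dropWhile (fun x => x == 0)).reverse with hys
    set zs := (arr.reverse.takeWhile (fun x => x == 0)).reverse with hzs
    have hysne : ys ≠ [] := by simpa [hys] using hrevne
    have hlast : ys.getLast hysne ≠ 0 := by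
      have h3 : ys.getLast hysne = (arr.reverse.dropWhile (fun x => x == 0)).head hrevne :=
        List.getLast_reverse _
      rw [h3]
      have h2 := List.head_dropWhile_not (fun x : Int => x == 0) (w := hrevne)
      simpa using h2
    have hzzero : ∀ z ∈ zs, z = 0 := fun z hz => by
      have := List.mem_takeWhile_imp (List.mem_reverse.1 hz)
      simpa using this
    have hlen : arr.length = ys.length + zs.length := by rw [harr]; simp
    have htw_ne : ys.takeWhile (fun x => x == 0) ≠ ys := by
      intro he
      have := List.takeWhile_eq_self_iff.1 he (ys.getLast hysne) (List.getLast_mem hysne)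
      simp at this; exact hlast this
    have htw_lt : (ys.takeWhile (fun x => x == 0)).length < ys.length := by
      have hle := (List.takeWhile_prefix (l := ys) (fun x => x == 0)).length_le
      rcases lt_or_eq_of_le hle with h' | h'
      · exact h'
      · exact absurd (List.IsPrefix.eq_of_length (List.takeWhile_prefix _) h') htw_ne
    have htw_eq : arr.takeWhile (fun x => x == 0) = ys.takeWhile (fun x => x == 0) := by
      conv_lhs => rw [harr]
      rw [List.takeWhile_append, if_neg (by omega)]
    have hstart : pvFindStart arr 0 (arr.length : Int) =
        ((arr.takeWhile (fun x => x == 0)).length : Int) := by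
      have := pvFindStart_spec arr []
      simpa using this
    have ha_lt : (arr.takeWhile (fun x => x == 0)).length < ys.length := by
      rw [htw_eq]; exact htw_lt
    have hend : ∀ s : Int, 0 ≤ s → s ≤ (ys.length : Int) →
        pvFindEnd arr s (arr.length : Int) = (ys.length : Int) := by
      intro s h0 h1
      conv_lhs => rw [harr]
      rw [show (((ys ++ zs).length : Nat) : Int) = (ys.length : Int) + (zs.length : Int) by
        push_cast [List.length_append]; ring]
      rw [pvFindEnd_zeros zs ys s hzzero h0 h1]
      exact pvFindEnd_stop ys s hysne hlast h1
    -- B side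
    rw [if_neg (by simpa [List.isEmpty_eq_false_iff] using hne)]
    have hhead := pvNonzeroIdx_head arr 0 hall
    have hlastq := pvNonzeroIdx_last arr 0 hall
    have hget0 : PySem.List.pyGetD (pvNonzeroIdx arr 0) 0 0 =
        ((arr.takeWhile (fun x => x == 0)).length : Int) := by
      rw [PySem.List.pyGetD_zero]
      cases hcase : pvNonzeroIdx arr 0 with
      | nil => exact absurd hcase hne
      | cons y ty =>
          rw [hcase] at hhead
          simp at hhead
          simpa using hhead
    have hgetneg : PySem.List.pyGetD (pvNonzeroIdx arr 0) (-1) 0 =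
        (arr.length : Int) - 1 - ((arr.reverse.takeWhile (fun x => x == 0)).length : Int) := by
      rw [PySem.List.pyGetD_neg_one _ _ hne]
      have := List.getLast?_eq_some_getLast hne
      rw [this] at hlastq
      simp at hlastq
      rw [hlastq]
    have hzslen : zs.length = (arr.reverse.takeWhile (fun x => x == 0)).length := by
      rw [hzs]; simp
    have hend' : pvFindEnd arr ((arr.takeWhile (fun x => x == 0)).length : Int)
        (arr.length : Int) = (ys.length : Int) :=
      hend _ (Int.natCast_nonneg _) (by exact_mod_cast le_of_lt ha_lt)
    simp only [hstart, hend', hget0, hgetneg]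
    have h1 : (arr.length : Int) = (ys.length : Int) + (zs.length : Int) := by
      exact_mod_cast hlen
    have h2 : ((arr.reverse.takeWhile (fun x => x == 0)).length : Int) = (zs.length : Int) := by
      exact_mod_cast hzslen.symm
    congr 2
    omega

theorem trim_zeros_spec : Claim_equal_trim_zeros := by
  intro arr _
  exact trim_zeros_spec_aux arr
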